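-- pv_equiv track=rewrite | github.com/JulienLacour98/Release_MasterThesis | FitnessFunction.py | suffix
-- ===== SOURCE A (Python) =====
-- def suffix(n, block_size, number_of_blocks, m, bit_string):
--     prefix_size = n - m
--     active_blocks = ""
--     for i in range(number_of_blocks):
--         count_ones = 0
--         for j in range(prefix_size + block_size * i, prefix_size + block_size * (i + 1)):
--             if bit_string[j] == "1":
--                 count_ones += 1
--         if count_ones == 0:
--             active_blocks += "0"
--         elif count_ones == 2:
--             active_blocks += "1"
--         else:
--             return False, -1
--     idx = 0
--     while idx < number_of_blocks and active_blocks[idx] == "1":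
--         idx += 1
--     value = idx
--     while idx < number_of_blocks and active_blocks[idx] == "0":
--         idx += 1
--     return idx == number_of_blocks, value
-- ===== SOURCE B (Python) =====
-- def suffix(n, block_size, number_of_blocks, m, bit_string):
--     prefix_size = n - m
--     value = 0
--     zeros = 0
--     counting = True
--     for i in range(number_of_blocks):
--         count_ones = 0
--         for j in range(prefix_size + block_size * i, prefix_size + block_size * (i + 1)):
--             if bit_string[j] == "1":
--                 count_ones += 1
--         if count_ones == 0:
--             zeros += 1
--             counting = False
--         elif count_ones == 2:
--             if counting:
--                 value += 1
--         else:
--             return False, -1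
--     return value + zeros == number_of_blocks, value
-- ===== Notes on version B (the rewrite author's own statement) =====
-- stated objective: simpler
-- what changed: B replaces A's build-an-active_blocks-string-then-two-while-scans structure with a single pass over the blocks that maintains a leading-full-block counter and an empty-block counter, returning (value + zeros == number_of_blocks, value) directly.
import Mathlib
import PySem

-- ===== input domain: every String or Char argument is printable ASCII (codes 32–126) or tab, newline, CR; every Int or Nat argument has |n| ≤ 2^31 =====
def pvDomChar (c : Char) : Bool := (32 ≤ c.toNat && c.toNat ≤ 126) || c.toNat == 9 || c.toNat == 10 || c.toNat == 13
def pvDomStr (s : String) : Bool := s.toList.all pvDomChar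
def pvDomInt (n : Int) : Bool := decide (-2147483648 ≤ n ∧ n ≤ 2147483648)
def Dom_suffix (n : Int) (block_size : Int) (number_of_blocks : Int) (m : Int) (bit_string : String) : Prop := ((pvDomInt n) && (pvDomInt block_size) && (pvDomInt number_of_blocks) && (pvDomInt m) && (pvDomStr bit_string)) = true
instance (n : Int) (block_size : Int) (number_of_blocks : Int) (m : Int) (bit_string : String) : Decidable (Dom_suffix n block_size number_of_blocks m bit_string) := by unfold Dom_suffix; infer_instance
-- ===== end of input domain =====

-- B replaces A's build-active_blocks-then-two-while-scans structure with a single pass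
-- keeping a leading-full-block counter and a count of empty blocks (objective: simpler).

-- ===== PORT A =====
-- shared inner loop (textually identical in both Pythons): count of "1" characters
-- over range(a, b); none = IndexError from bit_string[j]
def suffixCountOnes (s : String) (a b : Int) : Option Int :=
  (PySem.List.pyRange a b 1).foldl
    (fun acc j =>
      match acc with
      | none => none
      | some c =>
        match PySem.Str.pyGet? s j with
        | none => none
        | some ch => some (if ch = '1' then c + 1 else c))
    (some 0)

-- A's first for-loop: builds active_blocks (as a char list); some none = the
-- early 'return False, -1'; none = IndexError (excluded by Pre_suffix)
def suffixBuild (p bs : Int) (s : String) : List Int → List Char → Option (Option (List Char))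
  | [], acc => some (some acc)
  | i :: rest, acc =>
    match suffixCountOnes s (p + bs * i) (p + bs * (i + 1)) with
    | none => none
    | some c =>
      if c = 0 then suffixBuild p bs s rest (acc ++ ['0'])
      else if c = 2 then suffixBuild p bs s rest (acc ++ ['1'])
      else some none

-- A's 'while idx < number_of_blocks and active_blocks[idx] == c: idx += 1'
def suffixScan (ab : List Char) (nob : Int) (c : Char) (idx : Int) : Int :=
  if h : idx < nob ∧ PySem.List.pyGet? ab idx = some c then
    suffixScan ab nob c (idx + 1)
  else idx
termination_by (nob - idx).toNat
decreasing_by omega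

def suffix (n : Int) (block_size : Int) (number_of_blocks : Int) (m : Int) (bit_string : String) : Bool × Int :=
  let prefix_size := n - m
  match suffixBuild prefix_size block_size bit_string (PySem.List.pyRange 0 number_of_blocks 1) [] with
  | none => (false, -1)        -- IndexError: excluded by Pre_suffix
  | some none => (false, -1)   -- the early 'return False, -1'
  | some (some active_blocks) =>
    let idx := suffixScan active_blocks number_of_blocks '1' 0
    let value := idx
    let idx2 := suffixScan active_blocks number_of_blocks '0' idx
    (decide (idx2 = number_of_blocks), value)

-- ===== PORT B =====
-- B's single loop over the blocks, state (value, zeros, counting); some (value, zeros)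
-- at the end of the loop, none = the early 'return False, -1' on a bad count, or the
-- IndexError (excluded by Pre_suffix) — both are rendered (false, -1) below
def suffixAltLoop (p bs : Int) (s : String) : List Int → Int → Int → Bool → Option (Int × Int)
  | [], value, zeros, _counting => some (value, zeros)
  | i :: rest, value, zeros, counting =>
    match suffixCountOnes s (p + bs * i) (p + bs * (i + 1)) with
    | none => none             -- IndexError: excluded by Pre_suffix
    | some c =>
      if c = 0 then suffixAltLoop p bs s rest value (zeros + 1) false
      else if c = 2 then
        suffixAltLoop p bs s rest (if counting then value + 1 else value) zeros counting
      else none                -- the early 'return False, -1'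

def suffix_alt (n : Int) (block_size : Int) (number_of_blocks : Int) (m : Int) (bit_string : String) : Bool × Int :=
  match suffixAltLoop (n - m) block_size bit_string (PySem.List.pyRange 0 number_of_blocks 1) 0 0 true with
  | none => (false, -1)
  | some (value, zeros) => (decide (value + zeros = number_of_blocks), value)

-- ===== PRECONDITION & SPEC =====
-- number of '1' characters among the (Python-indexed) positions range(a, b); used only
-- to state where the IndexError occurs before anything else stops the scan
def pvOnes (s : String) (a b : Int) : Int :=
  ((PySem.List.pyRange a b 1).filter (fun j => PySem.Str.pyGet? s j == some '1')).length

-- closed-form condition on the input: A (and B, which scans the same indices in the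
-- same order) raises IndexError iff an accessed index leaves the valid range before
-- any invalid block count (not 0 or 2) triggers the early return
def pvRaisesIndexError (n : Int) (block_size : Int) (number_of_blocks : Int) (m : Int) (bit_string : String) : Bool :=
  let p := n - m
  let L := PySem.Str.len bit_string
  decide (0 < number_of_blocks) && decide (0 < block_size) &&
    (decide (p < -L) ||
      (decide (L < p + block_size * number_of_blocks) &&
        (PySem.List.pyRange 0 (PySem.Int.floordiv (max p L - p) block_size) 1).all
          (fun i => pvOnes bit_string (p + block_size * i) (p + block_size * (i + 1)) == 0 ||
                    pvOnes bit_string (p + block_size * i) (p + block_size * (i + 1)) == 2)))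

-- Pre_ excludes exactly the inputs on which both A and B raise IndexError: an accessed
-- index goes out of range before any invalid block triggers the early (False, -1) return.
def Pre_suffix (n : Int) (block_size : Int) (number_of_blocks : Int) (m : Int) (bit_string : String) : Prop :=
  pvRaisesIndexError n block_size number_of_blocks m bit_string = false
instance (n : Int) (block_size : Int) (number_of_blocks : Int) (m : Int) (bit_string : String) : Decidable (Pre_suffix n block_size number_of_blocks m bit_string) := by unfold Pre_suffix; infer_instance

def pvWitness_suffix : Int × Int × Int × Int × String := (6, 2, 2, 4, "110011")

def Spec_suffix (n : Int) (block_size : Int) (number_of_blocks : Int) (m : Int) (bit_string : String) (out : Bool × Int) : Prop := out = suffix_alt n block_size number_of_blocks m bit_string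
instance (n : Int) (block_size : Int) (number_of_blocks : Int) (m : Int) (bit_string : String) (out : Bool × Int) : Decidable (Spec_suffix n block_size number_of_blocks m bit_string out) := by unfold Spec_suffix; infer_instance

-- ===== CLAIM (what is proved, stated in full; the proofs are below) =====
def Claim_equal_suffix : Prop := ∀ (n : Int) (block_size : Int) (number_of_blocks : Int) (m : Int) (bit_string : String), Dom_suffix n block_size number_of_blocks m bit_string → Pre_suffix n block_size number_of_blocks m bit_string → Spec_suffix n block_size number_of_blocks m bit_string (suffix n block_size number_of_blocks m bit_string)

-- ===== LEMMAS AND PROOFS =====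

-- pure model of B's loop over the built block characters ('1' = full block, count 2)
def procVZ : List Char → Int → Int → Bool → Int × Int
  | [], v, z, _ => (v, z)
  | ch :: rest, v, z, k =>
    if ch = '1' then procVZ rest (if k then v + 1 else v) z k
    else procVZ rest v (z + 1) false

-- number of non-'1' block characters (the empty blocks, in a binary block string)
def chZ (l : List Char) : Int := ((l.filter (fun c => c ≠ '1')).length : Int)

theorem suffixBuild_structure (p bs : Int) (s : String) :
    ∀ (idxs : List Int) (acc res : List Char),
      suffixBuild p bs s idxs acc = some (some res) →
      ∃ t, res = acc ++ t ∧ t.length = idxs.length ∧ ∀ c ∈ t, c = '0' ∨ c = '1' := by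
  intro idxs
  induction idxs with
  | nil =>
    intro acc res h
    simp [suffixBuild] at h
    exact ⟨[], by simp [h], rfl, by simp⟩
  | cons i rest ih =>
    intro acc res h
    simp only [suffixBuild] at h
    cases hc : suffixCountOnes s (p + bs * i) (p + bs * (i + 1)) with
    | none => rw [hc] at h; simp at h
    | some c =>
      rw [hc] at h
      by_cases h0 : c = 0
      · simp only [h0, reduceIte] at h
        obtain ⟨t, ht, hl, hb⟩ := ih (acc ++ ['0']) res h
        refine ⟨'0' :: t, by simp [ht], by simp [hl], ?_⟩
        intro x hx
        rcases List.mem_cons.mp hx with hx1 | hx1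
        · exact Or.inl hx1
        · exact hb x hx1
      · by_cases h2 : c = 2
        · simp only [h2, reduceIte] at h
          obtain ⟨t, ht, hl, hb⟩ := ih (acc ++ ['1']) res h
          refine ⟨'1' :: t, by simp [ht], by simp [hl], ?_⟩
          intro x hx
          rcases List.mem_cons.mp hx with hx1 | hx1
          · exact Or.inr hx1
          · exact hb x hx1
        · simp [h0, h2] at h

-- B's loop agrees with procVZ on the characters A's first loop builds, and both sides
-- are none when A's first loop raises or early-returns
theorem altLoop_eq_procVZ (p bs : Int) (s : String) :
    ∀ (idxs : List Int) (acc : List Char) (v z : Int) (k : Bool),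
      suffixAltLoop p bs s idxs v z k =
        (match suffixBuild p bs s idxs acc with
         | some (some res) => some (procVZ (res.drop acc.length) v z k)
         | _ => none) := by
  intro idxs
  induction idxs with
  | nil => intro acc v z k; simp [suffixAltLoop, suffixBuild, procVZ]
  | cons i rest ih =>
    intro acc v z k
    simp only [suffixAltLoop, suffixBuild]
    cases hc : suffixCountOnes s (p + bs * i) (p + bs * (i + 1)) with
    | none => rfl
    | some c =>
      by_cases h0 : c = 0
      · subst h0
        norm_num
        cases hbu : suffixBuild p bs s rest (acc ++ ['0']) with
        | none => simp [ih (acc ++ ['0']), hbu]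
        | some o =>
          cases o with
          | none => simp [ih (acc ++ ['0']), hbu]
          | some res =>
            obtain ⟨t, ht, -, -⟩ := suffixBuild_structure p bs s rest (acc ++ ['0']) res hbu
            have hd1 : res.drop acc.length = '0' :: t := by
              subst ht
              rw [List.append_assoc]
              simp
            have hd2 : res.drop (acc.length + 1) = t := by
              subst ht
              simp
            simp [ih (acc ++ ['0']), hbu, hd1, hd2, procVZ]
      · by_cases h2 : c = 2
        · subst h2
          norm_num
          cases hbu : suffixBuild p bs s rest (acc ++ ['1']) with
          | none => simp [ih (acc ++ ['1']), hbu]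
          | some o =>
            cases o with
            | none => simp [ih (acc ++ ['1']), hbu]
            | some res =>
              obtain ⟨t, ht, -, -⟩ := suffixBuild_structure p bs s rest (acc ++ ['1']) res hbu
              have hd1 : res.drop acc.length = '1' :: t := by
                subst ht
                rw [List.append_assoc]
                simp
              have hd2 : res.drop (acc.length + 1) = t := by
                subst ht
                simp
              simp [ih (acc ++ ['1']), hbu, hd1, hd2, procVZ]
        · simp [h0, h2]

-- characterization of A's while-loop: it stops past the leading run of c
theorem suffixScan_spec (ab : List Char) (c : Char) :
    ∀ (k : Nat), k ≤ ab.length →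
      suffixScan ab (ab.length : Int) c (k : Int) =
        ((k + ((ab.drop k).takeWhile (· = c)).length : Nat) : Int) := by
  intro k
  induction hfuel : ab.length - k generalizing k with
  | zero =>
    intro hk
    have hk' : k = ab.length := by omega
    rw [suffixScan]
    rw [dif_neg (by simp [hk'])]
    simp [hk']
  | succ fuel ih =>
    intro hk
    have hk2 : k < ab.length := by omega
    rw [suffixScan]
    have hget : PySem.List.pyGet? ab (k : Int) = some ab[k] := by
      simp [hk2]
    have hdropk : ab.drop k = ab[k] :: ab.drop (k + 1) := List.drop_eq_getElem_cons hk2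
    by_cases hc : ab[k] = c
    · rw [dif_pos ⟨by exact_mod_cast hk2, by rw [hget, hc]⟩]
      have hcast : ((k : Int) + 1) = ((k + 1 : Nat) : Int) := by push_cast; ring
      rw [hcast, ih (k + 1) (by omega) (by omega)]
      rw [hdropk]
      simp [List.takeWhile, hc]
      omega
    · rw [dif_neg (by
        rintro ⟨-, h⟩
        rw [hget] at h
        exact hc (by injection h))]
      rw [hdropk]
      simp [List.takeWhile, hc]

theorem procVZ_false (l : List Char) (v z : Int) : procVZ l v z false = (v, z + chZ l) := by
  induction l generalizing z with
  | nil => simp [procVZ, chZ]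
  | cons ch rest ih =>
    by_cases h : ch = '1'
    · simp [procVZ, h, ih, chZ]
    · simp [procVZ, h, ih, chZ]
      omega

theorem procVZ_true (l : List Char) (v z : Int) :
    procVZ l v z true =
      (v + (((l.takeWhile (· = '1')).length : Nat) : Int), z + chZ l) := by
  induction l generalizing v z with
  | nil => simp [procVZ, chZ]
  | cons ch rest ih =>
    by_cases h : ch = '1'
    · simp [procVZ, h, ih, List.takeWhile, chZ]
      omega
    · simp [procVZ, h, procVZ_false, List.takeWhile, chZ]
      omega

-- on a binary block string, 'value + zeros = length' iff no full block follows the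
-- leading run of full blocks
theorem chZ_add_count (l : List Char) :
    (l.filter (fun c => c ≠ '1')).length + l.count '1' = l.length := by
  induction l with
  | nil => simp
  | cons ch rest ih =>
    by_cases h : ch = '1' <;> simp [List.filter_cons, List.count_cons, h] at ih ⊢ <;> omega

theorem sumZ_iff (ab : List Char) :
    ((((ab.takeWhile (· = '1')).length : Nat) : Int) + chZ ab = ((ab.length : Nat) : Int)) ↔
      '1' ∉ ab.drop (ab.takeWhile (· = '1')).length := by
  set t : Nat := (ab.takeWhile (· = '1')).length with htdef
  have hsplit : ab = ab.take t ++ ab.drop t := (List.take_append_drop t ab).symm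
  have htake : ab.take t = ab.takeWhile (· = '1') := by
    rw [htdef]
    exact (List.prefix_iff_eq_take.mp (List.takeWhile_prefix _)).symm
  have hcount_take : (ab.take t).count '1' = t := by
    rw [htake, htdef]
    refine List.count_eq_length.mpr ?_
    intro b hb
    have hb1 := List.mem_takeWhile_imp hb
    simp only [decide_eq_true_eq] at hb1
    exact hb1.symm
  have hcount : ab.count '1' = t + (ab.drop t).count '1' := by
    conv_lhs => rw [hsplit]
    rw [List.count_append, hcount_take]
  have hfl : (ab.filter (fun c => c ≠ '1')).length + ab.count '1' = ab.length :=
    chZ_add_count ab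
  have hmem : '1' ∉ ab.drop t ↔ (ab.drop t).count '1' = 0 := List.count_eq_zero.symm
  rw [hmem]
  unfold chZ
  omega

-- A's two while-scans, on a binary block string, return the leading-'1' run length and
-- the verdict 'nothing after the zero run'
theorem scanA_spec (ab : List Char) (hb : ∀ c ∈ ab, c = '0' ∨ c = '1') :
    (decide (suffixScan ab (ab.length : Int) '0' (suffixScan ab (ab.length : Int) '1' 0) = (ab.length : Int)),
     suffixScan ab (ab.length : Int) '1' 0) =
      (decide ('1' ∉ ab.drop (ab.takeWhile (· = '1')).length),
       (((ab.takeWhile (· = '1')).length : Nat) : Int)) := by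
  have ht : (ab.takeWhile (· = '1')).length ≤ ab.length := by
    exact (List.takeWhile_prefix _).length_le
  have h1 : suffixScan ab (ab.length : Int) '1' 0 =
      (((ab.takeWhile (· = '1')).length : Nat) : Int) := by
    have := suffixScan_spec ab '1' 0 (by omega)
    simpa using this
  set t : Nat := (ab.takeWhile (· = '1')).length with htdef
  set d : List Char := ab.drop t with hddef
  have h2 : suffixScan ab (ab.length : Int) '0' (t : Int) =
      ((t + (d.takeWhile (· = '0')).length : Nat) : Int) :=
    suffixScan_spec ab '0' t ht
  have hz : (d.takeWhile (· = '0')).length ≤ d.length := by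
    exact (List.takeWhile_prefix _).length_le
  have hdlen : d.length = ab.length - t := by simp [hddef]
  have hkey : (t + (d.takeWhile (· = '0')).length = ab.length) ↔ ('1' ∉ d) := by
    constructor
    · intro he
      have hlen : (d.takeWhile (· = '0')).length = d.length := by omega
      have heq : d.takeWhile (· = '0') = d :=
        (List.takeWhile_prefix _).eq_of_length hlen
      intro hmem
      have := List.mem_takeWhile_imp (heq ▸ hmem)
      simp at this
    · intro hnm
      have : d.takeWhile (· = '0') = d := List.takeWhile_eq_self_iff.mpr (by
        intro c hc
        rcases hb c (List.mem_of_mem_drop (hddef ▸ hc)) with h | h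
        · simp [h]
        · exact absurd (h ▸ hc) hnm)
      rw [this]
      omega
  rw [h1, h2]
  refine Prod.ext ?_ rfl
  dsimp only
  rw [decide_eq_decide]
  rw [show (((t + (d.takeWhile (· = '0')).length : Nat) : Int) = ((ab.length : Nat) : Int)) ↔
      (t + (d.takeWhile (· = '0')).length = ab.length) from Nat.cast_inj]
  exact hkey

-- A's while-scans on the empty list with a negative bound stop immediately
theorem suffixScan_nil_nonpos (nob : Int) (c : Char) (hn : ¬ 0 ≤ nob) :
    suffixScan ([] : List Char) nob c 0 = 0 := by
  rw [suffixScan]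
  rw [dif_neg (by rintro ⟨h1, -⟩; omega)]

-- ===== VERDICT (by name: the statement is the Claim_ definition above) =====
theorem suffix_spec : Claim_equal_suffix := by
  intro n bs nob m s _hdom _hpre
  unfold Spec_suffix suffix suffix_alt
  rw [altLoop_eq_procVZ (n - m) bs s (PySem.List.pyRange 0 nob 1) []]
  dsimp only
  cases hbu : suffixBuild (n - m) bs s (PySem.List.pyRange 0 nob 1) [] with
  | none => rfl
  | some o =>
    cases o with
    | none => rfl
    | some ab =>
      obtain ⟨t, ht, hlen, hbin⟩ :=
        suffixBuild_structure (n - m) bs s (PySem.List.pyRange 0 nob 1) [] ab hbu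
      have hab : ab = t := by simpa using ht
      subst hab
      simp only [List.drop_zero, List.length_nil]
      by_cases hnob : 0 ≤ nob
      · have hablen : ((ab.length : Nat) : Int) = nob := by
          rw [hlen, PySem.List.length_pyRange_one]
          omega
        have hp := procVZ_true ab 0 0
        simp only [zero_add] at hp
        simp only [hp]
        have hA := scanA_spec ab hbin
        simp only [hablen] at hA
        rw [hA]
        have hiff : ((((ab.takeWhile (· = '1')).length : Nat) : Int) + chZ ab = nob) ↔
            '1' ∉ ab.drop (ab.takeWhile (· = '1')).length := by
          rw [← hablen]
          exact sumZ_iff ab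
        refine Prod.ext ?_ rfl
        dsimp only
        rw [decide_eq_decide]
        exact hiff.symm
      · have hab0 : ab = [] := by
          have : ab.length = 0 := by
            rw [hlen, PySem.List.length_pyRange_one]
            omega
          exact List.length_eq_zero_iff.mp this
        subst hab0
        rw [suffixScan_nil_nonpos nob '1' hnob, suffixScan_nil_nonpos nob '0' hnob]
        simp [procVZ]
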